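-- pv_equiv track=rewrite | github.com/MockaWolke/aoc | 13.py | check
-- ===== SOURCE A (Python) =====
-- def check(rows):
--     for yr in range(1, len(rows)):
--         yl = yr - 1
--         diff = 0
--
--         while yl - diff >= 0 and yr + diff < len(rows):
--             if rows[yl - diff] != rows[yr + diff]:
--                 break
--
--             diff += 1
--         else:
--             return yr
-- ===== SOURCE B (Python) =====
-- def check(rows):
--     n = len(rows)
--     alive = list(range(1, n))
--     best = None
--     d = 0
--     while alive:
--         nxt = []
--         for yr in alive:
--             if yr - 1 - d < 0 or yr + d >= n:
--                 if best is None or yr < best: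
--                     best = yr
--             elif rows[yr - 1 - d] == rows[yr + d]:
--                 nxt.append(yr)
--         alive = nxt
--         d += 1
--     return best
-- ===== Notes on version B (the rewrite author's own statement) =====
-- stated objective: alternative
-- what changed: Instead of expanding each candidate mirror line with its own while-loop and returning at the first success, B expands all candidate centers simultaneously one radius level at a time, pruning a worklist of still-matching centers and folding centers whose reflection reaches a boundary into a running minimum, which it returns.
import Mathlib
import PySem

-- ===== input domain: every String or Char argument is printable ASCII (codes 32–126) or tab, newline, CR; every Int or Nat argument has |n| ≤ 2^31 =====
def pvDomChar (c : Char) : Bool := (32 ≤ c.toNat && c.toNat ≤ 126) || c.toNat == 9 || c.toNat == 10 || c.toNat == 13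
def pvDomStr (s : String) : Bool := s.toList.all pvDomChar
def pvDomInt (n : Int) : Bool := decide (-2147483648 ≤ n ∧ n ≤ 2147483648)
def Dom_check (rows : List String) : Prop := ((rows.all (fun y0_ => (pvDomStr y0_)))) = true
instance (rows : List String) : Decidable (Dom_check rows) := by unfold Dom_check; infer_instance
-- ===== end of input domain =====

-- B replaces A's per-center while-loop expansion (with early return) by a level-synchronous
-- sweep: all mirror centers are expanded one radius step at a time in a shrinking worklist,
-- centers whose reflection reaches a boundary are folded into a running minimum, and that
-- minimum is returned (objective: alternative; same worst-case cost).

-- ===== PORT A =====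
-- A's inner while loop; fuel only makes the recursion total (the loop exits before fuel runs out).
def checkWhile (rows : List String) (yl yr : Int) : Nat → Int → Bool
  | 0, _ => true
  | fuel + 1, diff =>
    if yl - diff ≥ 0 ∧ yr + diff < (rows.length : Int) then
      -- both indices are in range under the guard, so pyGetD is exact here
      if PySem.List.pyGetD rows (yl - diff) "" ≠ PySem.List.pyGetD rows (yr + diff) "" then false
      else checkWhile rows yl yr fuel (diff + 1)
    else true

def checkFor (rows : List String) : List Int → Option Int
  | [] => none
  | yr :: ys =>
    if checkWhile rows (yr - 1) yr (rows.length + 1) 0 then some yr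
    else checkFor rows ys

def check (rows : List String) : Option Int :=
  checkFor rows (PySem.List.pyRange 1 rows.length 1)

-- ===== PORT B =====
-- the inner 'for yr in alive' pass of one level d: builds nxt (by append) and updates best
def altLevel (rows : List String) (n d : Int) : List Int → List Int → Option Int → (List Int × Option Int)
  | [], nxt, best => (nxt, best)
  | yr :: rest, nxt, best =>
    if yr - 1 - d < 0 ∨ yr + d ≥ n then
      altLevel rows n d rest nxt
        (match best with
         | none => some yr
         | some b => if yr < b then some yr else some b)
    else if PySem.List.pyGetD rows (yr - 1 - d) "" == PySem.List.pyGetD rows (yr + d) "" then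
      altLevel rows n d rest (nxt ++ [yr]) best
    else
      altLevel rows n d rest nxt best

-- Source B's outer 'while alive:' loop; fuel only makes it total (alive empties within len(rows)+1 levels)
def altWhile (rows : List String) (n : Int) : Nat → List Int → Int → Option Int → Option Int
  | _, [], _, best => best
  | 0, _ :: _, _, best => best
  | fuel + 1, yr :: rest, d, best =>
    altWhile rows n fuel (altLevel rows n d (yr :: rest) [] best).1 (d + 1)
      (altLevel rows n d (yr :: rest) [] best).2

def check_alt (rows : List String) : Option Int :=
  altWhile rows rows.length (rows.length + 1) (PySem.List.pyRange 1 rows.length 1) 0 none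

-- ===== PRECONDITION & SPEC =====
def Spec_check (rows : List String) (out : Option Int) : Prop := out = check_alt rows
instance (rows : List String) (out : Option Int) : Decidable (Spec_check rows out) := by unfold Spec_check; infer_instance

-- ===== CLAIM (what is proved, stated in full; the proofs are below) =====
def Claim_equal_check : Prop := ∀ (rows : List String), Dom_check rows → Spec_check rows (check rows)

-- ===== LEMMAS AND PROOFS =====

-- proof-side vocabulary ------------------------------------------------------

-- one mirror comparison at radius k around the split before index yr
def E (rows : List String) (yr : Int) (k : Nat) : Bool :=
  PySem.List.pyGetD rows (yr - 1 - (k : Int)) "" == PySem.List.pyGetD rows (yr + (k : Int)) ""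

-- the number of comparisons before a boundary is reached
def bnd (rows : List String) (yr : Int) : Nat := min yr.toNat (rows.length - yr.toNat)

-- the split at yr is a valid mirror (all comparisons up to the boundary succeed)
def good (rows : List String) (yr : Int) : Bool := (List.range (bnd rows yr)).all (E rows yr)

-- python's 'if best is None or yr < best: best = yr'
def minOpt (b : Option Int) (y : Int) : Option Int :=
  match b with
  | none => some y
  | some v => if y < v then some y else some v

def listMin (b : Option Int) (l : List Int) : Option Int := l.foldl minOpt b

theorem listMin_cons (b : Option Int) (x : Int) (l : List Int) :
    listMin b (x :: l) = listMin (minOpt b x) l := rfl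

theorem minOpt_none (y : Int) : minOpt none y = some y := rfl

theorem minOpt_some (v y : Int) : minOpt (some v) y = some (min v y) := by
  simp only [minOpt]
  split_ifs with h
  · rw [min_eq_right (by omega)]
  · rw [min_eq_left (by omega)]

theorem minOpt_left_comm (b : Option Int) (y z : Int) :
    minOpt (minOpt b y) z = minOpt (minOpt b z) y := by
  cases b with
  | none => rw [minOpt_none, minOpt_none, minOpt_some, minOpt_some, min_comm]
  | some v =>
    rw [minOpt_some, minOpt_some, minOpt_some, minOpt_some, min_right_comm]

theorem listMin_minOpt (l : List Int) : ∀ (b : Option Int) (y : Int),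
    listMin (minOpt b y) l = minOpt (listMin b l) y := by
  induction l with
  | nil => intro b y; rfl
  | cons x xs ih =>
    intro b y
    rw [listMin_cons, listMin_cons, minOpt_left_comm b y x, ih]

theorem listMin_absorb (l : List Int) : ∀ (b : Int), (∀ y ∈ l, ¬ y < b) →
    listMin (some b) l = some b := by
  induction l with
  | nil => intro b _; rfl
  | cons x xs ih =>
    intro b h
    have hx : ¬ x < b := h x (List.mem_cons_self ..)
    rw [listMin_cons, show minOpt (some b) x = some b by simp [minOpt, hx]]
    exact ih b (fun y hy => h y (List.mem_cons_of_mem _ hy))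

-- A-side characterisation ----------------------------------------------------

theorem checkWhile_eq_all (rows : List String) (yr : Int) (h1 : 1 ≤ yr)
    (h2 : yr < (rows.length : Int)) :
    ∀ (fuel d : Nat), d ≤ bnd rows yr → bnd rows yr ≤ fuel + d →
      checkWhile rows (yr - 1) yr fuel (d : Int) =
        (List.range (bnd rows yr - d)).all (fun k => E rows yr (d + k)) := by
  intro fuel
  induction fuel with
  | zero =>
    intro d hd hfd
    have : bnd rows yr - d = 0 := by omega
    simp [checkWhile, this]
  | succ fuel ih =>
    intro d hd hfd
    rw [checkWhile]
    by_cases hlt : d < bnd rows yr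
    · have hg : yr - 1 - (d : Int) ≥ 0 ∧ yr + (d : Int) < (rows.length : Int) := by
        unfold bnd at hlt; omega
      rw [if_pos hg]
      have hrange : List.range (bnd rows yr - d) =
          0 :: (List.range (bnd rows yr - d - 1)).map Nat.succ := by
        rw [show bnd rows yr - d = (bnd rows yr - d - 1) + 1 by omega]
        exact List.range_succ_eq_map
      by_cases he : E rows yr d
      · have hne : ¬ PySem.List.pyGetD rows (yr - 1 - (d : Int)) "" ≠
            PySem.List.pyGetD rows (yr + (d : Int)) "" := by
          simpa [E] using he
        rw [if_neg hne]
        have hc : ((d : Int) + 1) = (((d + 1 : Nat)) : Int) := by push_cast; ring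
        rw [hc, ih (d + 1) (by omega) (by omega), hrange]
        have hsh : bnd rows yr - (d + 1) = bnd rows yr - d - 1 := by omega
        rw [hsh]
        have he0 : E rows yr (d + 0) = true := by simpa using he
        simp only [List.all_cons, List.all_map, he0, Bool.true_and]
        have hpt : ∀ k : Nat, E rows yr (d + 1 + k) = E rows yr (d + Nat.succ k) := by
          intro k; congr 1; omega
        simp only [Function.comp_def, hpt]
      · have he0 : E rows yr d = false := by
          revert he; cases (E rows yr d) <;> simp
        have hne : PySem.List.pyGetD rows (yr - 1 - (d : Int)) "" ≠
            PySem.List.pyGetD rows (yr + (d : Int)) "" := by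
          intro hcontra
          rw [E, hcontra] at he0
          simp at he0
        rw [if_pos hne]
        symm
        rw [List.all_eq_false]
        refine ⟨0, List.mem_range.mpr (by omega), ?_⟩
        simp [he0]
    · have hdb : d = bnd rows yr := by omega
      have hg : ¬ (yr - 1 - (d : Int) ≥ 0 ∧ yr + (d : Int) < (rows.length : Int)) := by
        unfold bnd at hdb; omega
      rw [if_neg hg]
      simp [hdb]

theorem checkWhile_eq_good (rows : List String) (yr : Int) (h1 : 1 ≤ yr)
    (h2 : yr < (rows.length : Int)) :
    checkWhile rows (yr - 1) yr (rows.length + 1) 0 = good rows yr := by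
  have h := checkWhile_eq_all rows yr h1 h2 (rows.length + 1) 0 (by omega)
    (by unfold bnd; omega)
  simp only [Nat.cast_zero, Nat.sub_zero, Nat.zero_add] at h
  rw [good]
  exact h

theorem checkFor_eq_find (rows : List String) : ∀ (l : List Int),
    (∀ yr ∈ l, 1 ≤ yr ∧ yr < (rows.length : Int)) →
    checkFor rows l = l.find? (good rows) := by
  intro l
  induction l with
  | nil => intro _; rfl
  | cons yr ys ih =>
    intro h
    obtain ⟨h1, h2⟩ := h yr (List.mem_cons_self ..)
    rw [checkFor, checkWhile_eq_good rows yr h1 h2]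
    by_cases hg : good rows yr
    · rw [if_pos hg, List.find?_cons_of_pos hg]
    · rw [if_neg hg, List.find?_cons_of_neg (by simpa using hg)]
      exact ih (fun y hy => h y (List.mem_cons_of_mem _ hy))

-- B-side characterisation ----------------------------------------------------

-- the survival invariant: yr has matched all levels below d
def seg (rows : List String) (yr : Int) (d : Nat) : Bool :=
  (List.range d).all (E rows yr)

theorem good_of_complete (rows : List String) (yr : Int) (d : Nat)
    (hs : seg rows yr d = true) (hb : bnd rows yr ≤ d) : good rows yr = true := by
  simp only [seg, List.all_eq_true, List.mem_range] at hs
  simp only [good, List.all_eq_true, List.mem_range]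
  intro k hk; exact hs k (by omega)

theorem not_good_of_mismatch (rows : List String) (yr : Int) (d : Nat)
    (hb : d < bnd rows yr) (he : E rows yr d = false) : good rows yr = false := by
  by_contra h
  simp only [Bool.not_eq_false, good, List.all_eq_true, List.mem_range] at h
  have := h d hb
  simp [he] at this

theorem seg_succ (rows : List String) (yr : Int) (d : Nat)
    (hs : seg rows yr d = true) (he : E rows yr d = true) : seg rows yr (d + 1) = true := by
  simp only [seg, List.all_eq_true, List.mem_range] at *
  intro k hk
  rcases Nat.lt_succ_iff_lt_or_eq.mp hk with h | h
  · exact hs k h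
  · subst h; exact he

-- the boundary guard of B is exactly 'bnd ≤ d'
theorem guard_iff (rows : List String) (yr : Int) (d : Nat) (h1 : 1 ≤ yr)
    (h2 : yr < (rows.length : Int)) :
    (yr - 1 - (d : Int) < 0 ∨ yr + (d : Int) ≥ (rows.length : Int)) ↔ bnd rows yr ≤ d := by
  unfold bnd; omega

-- survivors of one level
theorem altLevel_fst (rows : List String) (d : Nat) : ∀ (alive acc : List Int)
    (best : Option Int),
    (∀ yr ∈ alive, 1 ≤ yr ∧ yr < (rows.length : Int)) →
    (altLevel rows rows.length (d : Int) alive acc best).1 =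
      acc ++ alive.filter (fun yr => decide (d < bnd rows yr) && E rows yr d) := by
  intro alive
  induction alive with
  | nil => intro acc best _; simp [altLevel]
  | cons yr rest ih =>
    intro acc best h
    obtain ⟨h1, h2⟩ := h yr (List.mem_cons_self ..)
    have hrest := fun y hy => h y (List.mem_cons_of_mem _ hy)
    simp only [altLevel]
    by_cases hb : bnd rows yr ≤ d
    · rw [if_pos ((guard_iff rows yr d h1 h2).mpr hb)]
      rw [ih acc _ hrest]
      rw [List.filter_cons_of_neg (by simp [show ¬ d < bnd rows yr from by omega])]
    · rw [if_neg (fun hg => hb ((guard_iff rows yr d h1 h2).mp hg))]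
      by_cases he : E rows yr d
      · rw [if_pos (by simpa [E] using he)]
        rw [ih (acc ++ [yr]) _ hrest]
        rw [List.filter_cons_of_pos (by simp [he]; omega)]
        simp
      · have heF : E rows yr d = false := by revert he; cases (E rows yr d) <;> simp
        rw [if_neg (by simpa [E] using he)]
        rw [ih acc _ hrest]
        rw [List.filter_cons_of_neg (by simp [heF])]

-- the best accumulated over one level
theorem altLevel_snd (rows : List String) (d : Nat) : ∀ (alive acc : List Int)
    (best : Option Int),
    (∀ yr ∈ alive, 1 ≤ yr ∧ yr < (rows.length : Int)) →
    (altLevel rows rows.length (d : Int) alive acc best).2 =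
      listMin best (alive.filter (fun yr => decide (bnd rows yr ≤ d))) := by
  intro alive
  induction alive with
  | nil => intro acc best _; rfl
  | cons yr rest ih =>
    intro acc best h
    obtain ⟨h1, h2⟩ := h yr (List.mem_cons_self ..)
    have hrest := fun y hy => h y (List.mem_cons_of_mem _ hy)
    simp only [altLevel]
    by_cases hb : bnd rows yr ≤ d
    · rw [if_pos ((guard_iff rows yr d h1 h2).mpr hb)]
      rw [ih acc _ hrest]
      rw [List.filter_cons_of_pos (by simpa using hb), listMin_cons]
      have hupd : (match best with
         | none => some yr
         | some b => if yr < b then some yr else some b) = minOpt best yr := by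
        cases best <;> rfl
      rw [hupd]
    · rw [if_neg (fun hg => hb ((guard_iff rows yr d h1 h2).mp hg))]
      have hfc : List.filter (fun y => decide (bnd rows y ≤ d)) (yr :: rest) =
          List.filter (fun y => decide (bnd rows y ≤ d)) rest :=
        List.filter_cons_of_neg (by simpa using hb)
      by_cases he : E rows yr d
      · rw [if_pos (by simpa [E] using he), ih (acc ++ [yr]) _ hrest, hfc]
      · rw [if_neg (by simpa [E] using he), ih acc _ hrest, hfc]

-- splitting the minimum of the good centres into completers at level d and survivors
theorem split_min (rows : List String) (d : Nat) : ∀ (alive : List Int) (best : Option Int),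
    (∀ yr ∈ alive, seg rows yr d = true) →
    listMin (listMin best (alive.filter (fun yr => decide (bnd rows yr ≤ d))))
      ((alive.filter (fun yr => decide (d < bnd rows yr) && E rows yr d)).filter (good rows)) =
    listMin best (alive.filter (good rows)) := by
  intro alive
  induction alive with
  | nil => intro best _; rfl
  | cons x xs ih =>
    intro best h
    have hx := h x (List.mem_cons_self ..)
    have hxs := fun y hy => h y (List.mem_cons_of_mem _ hy)
    by_cases hb : bnd rows x ≤ d
    · have hg : good rows x = true := good_of_complete rows x d hx hb
      rw [List.filter_cons_of_pos (by simpa using hb),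
          List.filter_cons_of_neg (by simp [show ¬ d < bnd rows x from by omega]),
          List.filter_cons_of_pos (by simpa using hg),
          listMin_cons, listMin_cons]
      exact ih (minOpt best x) hxs
    · rw [List.filter_cons_of_neg (by simpa using hb)]
      by_cases he : E rows x d
      · rw [List.filter_cons_of_pos (by simp [he]; omega)]
        by_cases hg : good rows x
        · rw [List.filter_cons_of_pos (by simpa using hg),
              List.filter_cons_of_pos (by simpa using hg),
              listMin_cons, listMin_cons, ← listMin_minOpt]
          exact ih (minOpt best x) hxs
        · rw [List.filter_cons_of_neg (by simpa using hg),
              List.filter_cons_of_neg (by simpa using hg)]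
          exact ih best hxs
      · have heF : E rows x d = false := by revert he; cases (E rows x d) <;> simp
        have hgf : good rows x = false := not_good_of_mismatch rows x d (by omega) heF
        rw [List.filter_cons_of_neg (by simp [heF]),
            List.filter_cons_of_neg (by simp [hgf])]
        exact ih best hxs

-- the outer loop computes the minimum good centre
theorem altWhile_eq (rows : List String) : ∀ (fuel : Nat) (alive : List Int) (d : Nat)
    (best : Option Int),
    (∀ yr ∈ alive, 1 ≤ yr ∧ yr < (rows.length : Int) ∧ d ≤ bnd rows yr ∧ seg rows yr d = true) →
    rows.length + 1 ≤ fuel + d →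
    altWhile rows rows.length fuel alive (d : Int) best =
      listMin best (alive.filter (good rows)) := by
  intro fuel
  induction fuel with
  | zero =>
    intro alive d best h hf
    cases alive with
    | nil => rfl
    | cons yr rest =>
      obtain ⟨h1, h2, hd, _⟩ := h yr (List.mem_cons_self ..)
      exfalso
      have : bnd rows yr ≤ rows.length := by unfold bnd; omega
      omega
  | succ fuel ih =>
    intro alive d best h hf
    cases alive with
    | nil => rfl
    | cons yr rest =>
      rw [altWhile]
      have hmem : ∀ y ∈ yr :: rest, 1 ≤ y ∧ y < (rows.length : Int) :=
        fun y hy => ⟨(h y hy).1, (h y hy).2.1⟩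
      rw [altLevel_fst rows d _ [] best hmem, altLevel_snd rows d _ [] best hmem]
      simp only [List.nil_append]
      have hc : ((d : Int) + 1) = (((d + 1 : Nat)) : Int) := by push_cast; ring
      rw [hc, ih _ (d + 1) _ ?inv (by omega)]
      · exact split_min rows d (yr :: rest) best (fun y hy => (h y hy).2.2.2)
      case inv =>
        intro y hy
        rw [List.mem_filter] at hy
        obtain ⟨hymem, hcond⟩ := hy
        obtain ⟨hy1, hy2, _, hseg⟩ := h y hymem
        simp only [Bool.and_eq_true, decide_eq_true_eq] at hcond
        exact ⟨hy1, hy2, by omega, seg_succ rows y d hseg hcond.2⟩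

-- find? on an increasing range is the minimum of the satisfying elements
theorem find_eq_listMin (rows : List String) : ∀ (m : Nat) (k : Int),
    ((rows.length : Int) - k).toNat = m →
    (PySem.List.pyRange k rows.length 1).find? (good rows) =
      listMin none ((PySem.List.pyRange k rows.length 1).filter (good rows)) := by
  intro m
  induction m with
  | zero =>
    intro k hm
    rw [PySem.List.pyRange_one_eq_nil (by omega)]
    rfl
  | succ m ih =>
    intro k hm
    have hk : k < (rows.length : Int) := by omega
    rw [PySem.List.pyRange_one_cons hk]
    by_cases hg : good rows k
    · rw [List.find?_cons_of_pos hg, List.filter_cons_of_pos (by simpa using hg),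
          listMin_cons]
      rw [show minOpt none k = some k from rfl]
      rw [listMin_absorb]
      intro y hy
      rw [List.mem_filter] at hy
      have := (PySem.List.mem_pyRange_one.mp hy.1).1
      omega
    · rw [List.find?_cons_of_neg (by simpa using hg),
          List.filter_cons_of_neg (by simpa using hg)]
      exact ih (k + 1) (by omega)

-- ===== VERDICT (by name: the statement is the Claim_ definition above) =====
theorem check_spec : Claim_equal_check := by
  intro rows _
  unfold Spec_check check check_alt
  have hmem : ∀ yr ∈ PySem.List.pyRange 1 (rows.length : Int) 1,
      1 ≤ yr ∧ yr < (rows.length : Int) := by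
    intro yr hy
    exact PySem.List.mem_pyRange_one.mp hy
  rw [checkFor_eq_find rows _ hmem]
  rw [find_eq_listMin rows ((rows.length : Int) - 1).toNat 1 rfl]
  have hinv : ∀ yr ∈ PySem.List.pyRange 1 (rows.length : Int) 1,
      1 ≤ yr ∧ yr < (rows.length : Int) ∧ 0 ≤ bnd rows yr ∧ seg rows yr 0 = true := by
    intro yr hy
    obtain ⟨h1, h2⟩ := hmem yr hy
    exact ⟨h1, h2, Nat.zero_le _, by simp [seg]⟩
  have := altWhile_eq rows (rows.length + 1) (PySem.List.pyRange 1 (rows.length : Int) 1) 0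
    none hinv (by omega)
  simp only [Nat.cast_zero] at this
  rw [this]
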